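-- pv_equiv track=rewrite | github.com/roxas198/Quantum-Project-Group2 | Algorithm.py | magnitude_comparator
-- ===== SOURCE A (Python) =====
-- import math
--
-- N=16
--
-- def magnitude_comparator(l_n,l_y):
--     and_operation_anot_b = [0]*(int(math.log2(N)))
--     and_operation_bnot_a = [0]*(int(math.log2(N)))
--     for i in range(int(math.log2(N))):
--         and_operation_anot_b[i] = invertBits(l_n[int(math.log2(N))-i-1]) & l_y[int(math.log2(N))-i-1]
--         and_operation_bnot_a[i] = invertBits(l_y[int(math.log2(N))-i-1]) & l_n[int(math.log2(N))-i-1]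
--
--     temp = [0]*(int(math.log2(N))-1)
--     for i in range(3):
--         temp[i] = invertBits(and_operation_anot_b[int(math.log2(N))-i-1] | and_operation_bnot_a[int(math.log2(N))-i-1])
--
--     param2 = temp[0] & (and_operation_anot_b[int(math.log2(N))-2])
--     param3 = temp[0] & temp[1] & (and_operation_anot_b[int(math.log2(N))-3])
--     param4 = temp[0] & temp[1] & temp[2] &  (and_operation_anot_b[0])
--
--     return (and_operation_anot_b[int(math.log2(N))-1] | param2 | param3 | param4 )
--
-- def invertBits(num):
--     if num==0:
--         return 1
--     else:
--         return 0
-- ===== SOURCE B (Python) =====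
-- # B: scan bit positions MSB-first and return at the first differing position,
-- # instead of precomputing a_not_b / b_not_a / temp arrays and OR-ing product terms.
-- def magnitude_comparator(l_n, l_y):
--     for p in range(4):
--         lt = invertBits(l_n[p]) & l_y[p]
--         gt = invertBits(l_y[p]) & l_n[p]
--         if lt | gt != 0:
--             return lt
--     return 0
--
-- def invertBits(num):
--     if num == 0:
--         return 1
--     else:
--         return 0
-- ===== Notes on version B (the rewrite author's own statement) =====
-- stated objective: simpler
-- what changed: B replaces A's precomputed a_not_b/b_not_a/temp arrays and OR-of-AND product terms by a single MSB-first scan that returns the less-than bit at the first differing position.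
import Mathlib
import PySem

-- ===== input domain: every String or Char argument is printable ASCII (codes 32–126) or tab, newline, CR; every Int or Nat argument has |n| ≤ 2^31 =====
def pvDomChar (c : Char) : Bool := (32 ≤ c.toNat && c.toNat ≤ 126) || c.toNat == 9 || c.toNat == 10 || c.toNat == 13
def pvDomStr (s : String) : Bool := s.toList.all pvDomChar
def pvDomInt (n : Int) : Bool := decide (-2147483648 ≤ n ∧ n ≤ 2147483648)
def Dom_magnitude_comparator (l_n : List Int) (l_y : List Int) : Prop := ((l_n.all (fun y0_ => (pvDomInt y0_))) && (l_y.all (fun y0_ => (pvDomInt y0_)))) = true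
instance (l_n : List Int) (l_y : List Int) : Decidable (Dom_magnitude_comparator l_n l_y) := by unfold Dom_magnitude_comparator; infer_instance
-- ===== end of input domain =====

-- B changes the decomposition: a single MSB-first early-return scan instead of A's
-- array precomputation and OR-of-AND product terms; equal return value on all lists of length ≥ 4.

-- ===== PORT A =====
-- invertBits is defined identically in A's module and in Source B; shared helper.
def invertBits (num : Int) : Int := if num == 0 then 1 else 0

-- int(math.log2(N)) with N = 16 is the constant 4 (exact: math.log2(16) = 4.0); ported as the literal 4.
def magnitude_comparator (l_n : List Int) (l_y : List Int) : Int :=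
  let anb := (PySem.List.pyRange 0 4 1).map (fun i =>
    PySem.Int.band (invertBits (PySem.List.pyGetD l_n (4 - i - 1) 0)) (PySem.List.pyGetD l_y (4 - i - 1) 0))
  let bna := (PySem.List.pyRange 0 4 1).map (fun i =>
    PySem.Int.band (invertBits (PySem.List.pyGetD l_y (4 - i - 1) 0)) (PySem.List.pyGetD l_n (4 - i - 1) 0))
  let temp := (PySem.List.pyRange 0 3 1).map (fun i =>
    invertBits (PySem.Int.bor (PySem.List.pyGetD anb (4 - i - 1) 0) (PySem.List.pyGetD bna (4 - i - 1) 0)))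
  let param2 := PySem.Int.band (PySem.List.pyGetD temp 0 0) (PySem.List.pyGetD anb 2 0)
  let param3 := PySem.Int.band (PySem.Int.band (PySem.List.pyGetD temp 0 0) (PySem.List.pyGetD temp 1 0)) (PySem.List.pyGetD anb 1 0)
  let param4 := PySem.Int.band (PySem.Int.band (PySem.Int.band (PySem.List.pyGetD temp 0 0) (PySem.List.pyGetD temp 1 0)) (PySem.List.pyGetD temp 2 0)) (PySem.List.pyGetD anb 0 0)
  PySem.Int.bor (PySem.Int.bor (PySem.Int.bor (PySem.List.pyGetD anb 3 0) param2) param3) param4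

-- ===== PORT B =====
def mcScan (l_n : List Int) (l_y : List Int) : List Int → Int
  | [] => 0
  | p :: ps =>
      let lt := PySem.Int.band (invertBits (PySem.List.pyGetD l_n p 0)) (PySem.List.pyGetD l_y p 0)
      let gt := PySem.Int.band (invertBits (PySem.List.pyGetD l_y p 0)) (PySem.List.pyGetD l_n p 0)
      if PySem.Int.bor lt gt ≠ 0 then lt else mcScan l_n l_y ps

def magnitude_comparator_alt (l_n : List Int) (l_y : List Int) : Int :=
  mcScan l_n l_y (PySem.List.pyRange 0 4 1)

-- ===== PRECONDITION & SPEC =====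
-- Pre_ excludes exactly the inputs where the Python A raises IndexError (a list shorter than 4).
def Pre_magnitude_comparator (l_n : List Int) (l_y : List Int) : Prop :=
  4 ≤ l_n.length ∧ 4 ≤ l_y.length
instance (l_n : List Int) (l_y : List Int) : Decidable (Pre_magnitude_comparator l_n l_y) := by
  unfold Pre_magnitude_comparator; infer_instance

def pvWitness_magnitude_comparator : List Int × List Int := ([1, 0, 1, 0], [0, 1, 1, 0])

def Spec_magnitude_comparator (l_n : List Int) (l_y : List Int) (out : Int) : Prop := out = magnitude_comparator_alt l_n l_y
instance (l_n : List Int) (l_y : List Int) (out : Int) : Decidable (Spec_magnitude_comparator l_n l_y out) := by unfold Spec_magnitude_comparator; infer_instance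

-- ===== CLAIM (what is proved, stated in full; the proofs are below) =====
def Claim_equal_magnitude_comparator : Prop := ∀ (l_n : List Int) (l_y : List Int), Dom_magnitude_comparator l_n l_y → Pre_magnitude_comparator l_n l_y → Spec_magnitude_comparator l_n l_y (magnitude_comparator l_n l_y)

-- ===== LEMMAS AND PROOFS =====

-- invertBits returns 0 or 1, and `x & b` with x ∈ {0,1} is b's low bit, hence 0 or 1.
theorem lbit_zero_or_one (a b : Int) :
    PySem.Int.band (invertBits a) b = 0 ∨ PySem.Int.band (invertBits a) b = 1 := by
  unfold invertBits
  split
  · rw [PySem.Int.band_comm, PySem.Int.band_one]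
    have h1 := PySem.Int.mod_nonneg b (b := 2) (by norm_num)
    have h2 := PySem.Int.mod_lt b (b := 2) (by norm_num)
    omega
  · left; rw [PySem.Int.band_comm, PySem.Int.band_zero]

-- Combinational core: with all eight per-position lt/gt bits in {0,1}, A's OR-of-AND
-- formula equals B's first-difference early return.
theorem mc_bash (L0 G0 L1 G1 L2 G2 L3 G3 : Int)
    (h0 : L0 = 0 ∨ L0 = 1) (k0 : G0 = 0 ∨ G0 = 1)
    (h1 : L1 = 0 ∨ L1 = 1) (k1 : G1 = 0 ∨ G1 = 1)
    (h2 : L2 = 0 ∨ L2 = 1) (k2 : G2 = 0 ∨ G2 = 1)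
    (h3 : L3 = 0 ∨ L3 = 1) (k3 : G3 = 0 ∨ G3 = 1) :
    PySem.Int.bor
      (PySem.Int.bor
        (PySem.Int.bor L0 (PySem.Int.band (invertBits (PySem.Int.bor L0 G0)) L1))
        (PySem.Int.band (PySem.Int.band (invertBits (PySem.Int.bor L0 G0)) (invertBits (PySem.Int.bor L1 G1))) L2))
      (PySem.Int.band (PySem.Int.band (PySem.Int.band (invertBits (PySem.Int.bor L0 G0)) (invertBits (PySem.Int.bor L1 G1))) (invertBits (PySem.Int.bor L2 G2))) L3)
    =
    (if PySem.Int.bor L0 G0 = 0 then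
       if PySem.Int.bor L1 G1 = 0 then
         if PySem.Int.bor L2 G2 = 0 then
           if PySem.Int.bor L3 G3 = 0 then 0 else L3
         else L2
       else L1
     else L0) := by
  rcases h0 with h0 | h0 <;> rcases k0 with k0 | k0 <;>
  rcases h1 with h1 | h1 <;> rcases k1 with k1 | k1 <;>
  rcases h2 with h2 | h2 <;> rcases k2 with k2 | k2 <;>
  rcases h3 with h3 | h3 <;> rcases k3 with k3 | k3 <;>
  subst_vars <;> decide

theorem gd0 (x0 : Int) (t : List Int) : PySem.List.pyGetD (x0 :: t) 0 0 = x0 := by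
  simp [pysem]

theorem gd1 (x0 x1 : Int) (t : List Int) : PySem.List.pyGetD (x0 :: x1 :: t) 1 0 = x1 := by
  rw [show (1 : Int) = ((1 : Nat) : Int) from rfl, PySem.List.pyGetD_natCast]; rfl

theorem gd2 (x0 x1 x2 : Int) (t : List Int) : PySem.List.pyGetD (x0 :: x1 :: x2 :: t) 2 0 = x2 := by
  rw [show (2 : Int) = ((2 : Nat) : Int) from rfl, PySem.List.pyGetD_natCast]; rfl

theorem gd3 (x0 x1 x2 x3 : Int) (t : List Int) : PySem.List.pyGetD (x0 :: x1 :: x2 :: x3 :: t) 3 0 = x3 := by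
  rw [show (3 : Int) = ((3 : Nat) : Int) from rfl, PySem.List.pyGetD_natCast]; rfl

set_option maxHeartbeats 2000000 in
theorem mc_key (a0 a1 a2 a3 b0 b1 b2 b3 : Int) (r s : List Int) :
    magnitude_comparator (a0 :: a1 :: a2 :: a3 :: r) (b0 :: b1 :: b2 :: b3 :: s)
      = magnitude_comparator_alt (a0 :: a1 :: a2 :: a3 :: r) (b0 :: b1 :: b2 :: b3 :: s) := by
  have r4 : PySem.List.pyRange 0 4 1 = [0, 1, 2, 3] := by decide
  have r3 : PySem.List.pyRange 0 3 1 = [0, 1, 2] := by decide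
  simp only [magnitude_comparator, magnitude_comparator_alt, mcScan, r4, r3, List.map]
  norm_num [gd0, gd1, gd2, gd3]
  exact mc_bash _ _ _ _ _ _ _ _
    (lbit_zero_or_one a0 b0) (lbit_zero_or_one b0 a0)
    (lbit_zero_or_one a1 b1) (lbit_zero_or_one b1 a1)
    (lbit_zero_or_one a2 b2) (lbit_zero_or_one b2 a2)
    (lbit_zero_or_one a3 b3) (lbit_zero_or_one b3 a3)

-- ===== VERDICT (by name: the statement is the Claim_ definition above) =====
theorem magnitude_comparator_spec : Claim_equal_magnitude_comparator := by
  intro l_n l_y _ hpre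
  obtain ⟨hn, hy⟩ := hpre
  match l_n, l_y with
  | a0 :: a1 :: a2 :: a3 :: r, b0 :: b1 :: b2 :: b3 :: s =>
    exact mc_key a0 a1 a2 a3 b0 b1 b2 b3 r s
  | [], _ => simp at hn
  | [_], _ => simp at hn
  | [_, _], _ => simp at hn
  | [_, _, _], _ => simp at hn
  | _ :: _ :: _ :: _ :: _, [] => simp at hy
  | _ :: _ :: _ :: _ :: _, [_] => simp at hy
  | _ :: _ :: _ :: _ :: _, [_, _] => simp at hy
  | _ :: _ :: _ :: _ :: _, [_, _, _] => simp at hy
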